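-- pv_equiv track=rewrite | github.com/blocher/dailyoffice2019 | site/test_book_lookup.py | normalize_book_name
-- ===== SOURCE A (Python) =====
-- def normalize_book_name(book_name):
--     roman_to_arabic = {
--         "I ": "1 ",
--         "II ": "2 ",
--         "III ": "3 ",
--         "IV ": "4 ",
--     }
--     for roman, arabic in roman_to_arabic.items():
--         if book_name.startswith(roman):
--             return arabic + book_name[len(roman):]
--     return book_name
-- ===== SOURCE B (Python) =====
-- def normalize_book_name(book_name):
--     parts = book_name.split(' ', 1)
--     arabic = {"I": "1", "II": "2", "III": "3", "IV": "4"}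
--     if len(parts) == 2 and parts[0] in arabic:
--         return arabic[parts[0]] + ' ' + parts[1]
--     return book_name
-- ===== Notes on version B (the rewrite author's own statement) =====
-- stated objective: simpler
-- what changed: Replaces the prefix-scan loop over the four roman prefixes with a single split of the name at the first space followed by one dict lookup on the first token.
import Mathlib
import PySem

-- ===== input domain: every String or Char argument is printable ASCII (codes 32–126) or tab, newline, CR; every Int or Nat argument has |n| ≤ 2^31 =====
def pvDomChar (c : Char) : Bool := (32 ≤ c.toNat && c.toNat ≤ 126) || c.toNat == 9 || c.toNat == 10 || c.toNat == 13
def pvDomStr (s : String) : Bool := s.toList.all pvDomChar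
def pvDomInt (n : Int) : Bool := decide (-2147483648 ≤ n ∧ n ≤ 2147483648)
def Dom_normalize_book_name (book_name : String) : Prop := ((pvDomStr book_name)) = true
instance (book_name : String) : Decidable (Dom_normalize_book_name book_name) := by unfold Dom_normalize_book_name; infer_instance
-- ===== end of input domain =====

-- B replaces A's four-prefix scan loop by splitting the name once at the first space
-- and doing one dict lookup on the first token (objective: simpler).


-- ===== PORT A =====
-- A's dict literal, as an association list in insertion order
def pvRomanPairs : List (String × String) :=
  [("I ", "1 "), ("II ", "2 "), ("III ", "3 "), ("IV ", "4 ")]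

-- the 'for roman, arabic in roman_to_arabic.items():' loop of A
def pvGoA : List (String × String) → String → String
  | [], book_name => book_name
  | (roman, arabic) :: rest, book_name =>
    if PySem.Str.startswith book_name roman then
      String.ofList (arabic.toList ++ PySem.Chars.slice book_name.toList (some (PySem.Str.len roman)) none)
    else pvGoA rest book_name

def normalize_book_name (book_name : String) : String :=
  pvGoA pvRomanPairs book_name

-- ===== PORT B =====
-- B's dict {'I': '1', 'II': '2', 'III': '3', 'IV': '4'}
def pvRomanDict : PySem.Dict String String := ⟨[("I", "1"), ("II", "2"), ("III", "3"), ("IV", "4")]⟩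

def normalize_book_name_alt (book_name : String) : String :=
  match PySem.Str.splitMax? book_name " " 1 with
  | some [p0, p1] =>
    match pvRomanDict.get? p0 with
    | some arabic => String.ofList (arabic.toList ++ ' ' :: p1.toList)
    | none => book_name
  | _ => book_name

-- ===== PRECONDITION & SPEC =====
def Spec_normalize_book_name (book_name : String) (out : String) : Prop := out = normalize_book_name_alt book_name
instance (book_name : String) (out : String) : Decidable (Spec_normalize_book_name book_name out) := by unfold Spec_normalize_book_name; infer_instance

-- ===== CLAIM (what is proved, stated in full; the proofs are below) =====
def Claim_equal_normalize_book_name : Prop := ∀ (book_name : String), Dom_normalize_book_name book_name → Spec_normalize_book_name book_name (normalize_book_name book_name)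

-- ===== LEMMAS AND PROOFS =====

-- the split worker with exhausted maxsplit budget returns everything left as the last piece
lemma pvGo_m0 (fuel : Nat) (l cur : List Char) (acc : List (List Char)) :
    PySem.Chars.splitOnMax.go [' '] fuel 0 l cur acc = ((cur.reverse ++ l) :: acc).reverse := by
  cases fuel with
  | zero => rfl
  | succ n => cases l with
    | nil => simp [PySem.Chars.splitOnMax.go]
    | cons c rest => simp [PySem.Chars.splitOnMax.go]

-- the split worker with budget 1 splits at the first space, if any
lemma pvGo_spec : ∀ (fuel : Nat) (l cur : List Char) (acc : List (List Char)), l.length < fuel →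
    PySem.Chars.splitOnMax.go [' '] fuel 1 l cur acc =
      if ' ' ∈ l
      then acc.reverse ++ [cur.reverse ++ l.takeWhile (· ≠ ' '), (l.dropWhile (· ≠ ' ')).tail]
      else acc.reverse ++ [cur.reverse ++ l] := by
  intro fuel
  induction fuel with
  | zero => intro l cur acc h; omega
  | succ n ih =>
    intro l cur acc h
    cases l with
    | nil => simp [PySem.Chars.splitOnMax.go]
    | cons c rest =>
      by_cases hc : c = ' '
      · subst hc
        simp only [PySem.Chars.splitOnMax.go, List.isPrefixOf, BEq.rfl, Bool.true_and]
        simp [pvGo_m0]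
      · have hpre : (List.isPrefixOf [' '] (c :: rest)) = false := by
          simp [List.isPrefixOf]; exact fun h => absurd h.symm hc
        simp only [PySem.Chars.splitOnMax.go, hpre]
        rw [ih rest (c :: cur) acc (by simpa using Nat.lt_of_succ_lt_succ h)]
        simp [hc, Ne.symm hc]

-- split(' ', 1): break at the first space
lemma pvSplit1 (l : List Char) :
    PySem.Chars.splitOnMax l [' '] 1 =
      if ' ' ∈ l
      then [l.takeWhile (· ≠ ' '), (l.dropWhile (· ≠ ' ')).tail]
      else [l] := by
  have h := pvGo_spec (l.length + 1) l [] [] (by omega)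
  simp only [PySem.Chars.splitOnMax]
  norm_num
  simpa using h

-- when a space occurs, dropWhile starts with it
lemma pvDropWhile_head (l : List Char) (hsp : ' ' ∈ l) :
    l.dropWhile (· ≠ ' ') = ' ' :: (l.dropWhile (· ≠ ' ')).tail := by
  have hne : l.dropWhile (· ≠ ' ') ≠ [] := by
    simp only [ne_eq, List.dropWhile_eq_nil_iff]
    intro h
    simpa using h ' ' hsp
  have hh := List.head_dropWhile_not (p := fun x => decide (x ≠ ' ')) (l := l) hne
  simp only [decide_eq_false_iff_not, not_not] at hh
  conv_lhs => rw [← List.cons_head_tail hne]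
  rw [hh]

-- "t + ' ' is a prefix of l" ⟺ "l contains a space and its first token is t"
lemma pvTok (t l : List Char) (ht : ' ' ∉ t) :
    (t ++ [' ']) <+: l ↔ (' ' ∈ l ∧ l.takeWhile (· ≠ ' ') = t) := by
  constructor
  · rintro ⟨r, rfl⟩
    refine ⟨by simp, ?_⟩
    rw [List.append_assoc, List.takeWhile_append, if_pos]
    · simp
    · congr 1
      rw [List.takeWhile_eq_self_iff]
      intro x hx
      by_contra hcon
      simp at hcon
      exact ht (hcon ▸ hx)
  · rintro ⟨hsp, rfl⟩
    refine ⟨(l.dropWhile (· ≠ ' ')).tail, ?_⟩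
    conv_rhs => rw [← List.takeWhile_append_dropWhile (p := (· ≠ ' ')) (l := l)]
    rw [pvDropWhile_head l hsp]
    simp

-- l splits as first-token ++ ' ' ++ rest when a space occurs
lemma pvDecomp (l : List Char) (hsp : ' ' ∈ l) :
    l = l.takeWhile (· ≠ ' ') ++ ' ' :: (l.dropWhile (· ≠ ' ')).tail := by
  conv_lhs => rw [← List.takeWhile_append_dropWhile (p := (· ≠ ' ')) (l := l)]
  rw [pvDropWhile_head l hsp]
  simp

-- String.ofList is injective (via toList)
lemma pvOfListNe (t T : List Char) (h : T ≠ t) : (String.ofList t == String.ofList T) = false := by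
  simp only [beq_eq_false_iff_ne, ne_eq]
  intro hcon
  apply h
  have := congrArg String.toList hcon
  simpa using this.symm

-- the central pointwise equality (no Dom hypothesis needed)
lemma pvMain (s : String) : normalize_book_name s = normalize_book_name_alt s := by
  by_cases hsp : ' ' ∈ s.toList
  · set T := s.toList.takeWhile (· ≠ ' ') with hT
    set R := (s.toList.dropWhile (· ≠ ' ')).tail with hR
    have hs : PySem.Str.splitMax? s " " 1 = some [String.ofList T, String.ofList R] := by
      simp only [PySem.Str.splitMax?, PySem.Chars.splitMax?, show (" " : String).toList = [' '] from rfl]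
      rw [pvSplit1]
      simp [hsp, hT, hR]
    have hdec : s.toList = T ++ ' ' :: R := pvDecomp s.toList hsp
    have hcond : ∀ t : List Char, ' ' ∉ t →
        (PySem.Chars.startswith s.toList (t ++ [' ']) = true ↔ T = t) := by
      intro t htn
      rw [PySem.Chars.startswith_iff, pvTok t s.toList htn]
      exact ⟨fun h => h.2, fun h => ⟨hsp, h⟩⟩
    have hBval : ∀ v : String, pvRomanDict.get? (String.ofList T) = some v →
        normalize_book_name_alt s = String.ofList (v.toList ++ ' ' :: R) := by
      intro v hv
      simp [normalize_book_name_alt, hs, hv]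
    by_cases h1 : T = ['I']
    · have c1 : PySem.Str.startswith s "I " = true := by
        simpa [PySem.Str.startswith, show ("I " : String).toList = ['I'] ++ [' '] from rfl]
          using (hcond ['I'] (by decide)).2 h1
      rw [hBval "1" (by rw [h1]; rfl)]
      simp only [normalize_book_name, pvGoA, pvRomanPairs, c1, if_true]
      rw [show (PySem.Str.len "I ") = ((2 : Nat) : Int) from rfl]
      simp only [PySem.Chars.slice_eq_listSlice, PySem.List.slice_from_natCast]
      rw [hdec, h1]
      simp
    · have c1 : PySem.Str.startswith s "I " = false := by
        simp only [PySem.Str.startswith, show ("I " : String).toList = ['I'] ++ [' '] from rfl]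
        exact Bool.eq_false_iff.mpr (fun hc => h1 ((hcond ['I'] (by decide)).1 hc))
      by_cases h2 : T = ['I', 'I']
      · have c2 : PySem.Str.startswith s "II " = true := by
          simpa [PySem.Str.startswith, show ("II " : String).toList = ['I','I'] ++ [' '] from rfl]
            using (hcond ['I','I'] (by decide)).2 h2
        rw [hBval "2" (by rw [h2]; rfl)]
        simp only [normalize_book_name, pvGoA, pvRomanPairs, c1, c2, if_true, Bool.false_eq_true, if_false]
        rw [show (PySem.Str.len "II ") = ((3 : Nat) : Int) from rfl]
        simp only [PySem.Chars.slice_eq_listSlice, PySem.List.slice_from_natCast]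
        rw [hdec, h2]
        simp
      · have c2 : PySem.Str.startswith s "II " = false := by
          simp only [PySem.Str.startswith, show ("II " : String).toList = ['I','I'] ++ [' '] from rfl]
          exact Bool.eq_false_iff.mpr (fun hc => h2 ((hcond ['I','I'] (by decide)).1 hc))
        by_cases h3 : T = ['I', 'I', 'I']
        · have c3 : PySem.Str.startswith s "III " = true := by
            simpa [PySem.Str.startswith, show ("III " : String).toList = ['I','I','I'] ++ [' '] from rfl]
              using (hcond ['I','I','I'] (by decide)).2 h3
          rw [hBval "3" (by rw [h3]; rfl)]
          simp only [normalize_book_name, pvGoA, pvRomanPairs, c1, c2, c3, if_true, Bool.false_eq_true, if_false]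
          rw [show (PySem.Str.len "III ") = ((4 : Nat) : Int) from rfl]
          simp only [PySem.Chars.slice_eq_listSlice, PySem.List.slice_from_natCast]
          rw [hdec, h3]
          simp
        · have c3 : PySem.Str.startswith s "III " = false := by
            simp only [PySem.Str.startswith, show ("III " : String).toList = ['I','I','I'] ++ [' '] from rfl]
            exact Bool.eq_false_iff.mpr (fun hc => h3 ((hcond ['I','I','I'] (by decide)).1 hc))
          by_cases h4 : T = ['I', 'V']
          · have c4 : PySem.Str.startswith s "IV " = true := by
              simpa [PySem.Str.startswith, show ("IV " : String).toList = ['I','V'] ++ [' '] from rfl]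
                using (hcond ['I','V'] (by decide)).2 h4
            rw [hBval "4" (by rw [h4]; rfl)]
            simp only [normalize_book_name, pvGoA, pvRomanPairs, c1, c2, c3, c4, if_true, Bool.false_eq_true, if_false]
            rw [show (PySem.Str.len "IV ") = ((3 : Nat) : Int) from rfl]
            simp only [PySem.Chars.slice_eq_listSlice, PySem.List.slice_from_natCast]
            rw [hdec, h4]
            simp
          · have c4 : PySem.Str.startswith s "IV " = false := by
              simp only [PySem.Str.startswith, show ("IV " : String).toList = ['I','V'] ++ [' '] from rfl]
              exact Bool.eq_false_iff.mpr (fun hc => h4 ((hcond ['I','V'] (by decide)).1 hc))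
            have hnone : pvRomanDict.get? (String.ofList T) = none := by
              simp [pvRomanDict, PySem.Dict.get?, List.find?,
                show ("I" : String) = String.ofList ['I'] from rfl,
                show ("II" : String) = String.ofList ['I','I'] from rfl,
                show ("III" : String) = String.ofList ['I','I','I'] from rfl,
                show ("IV" : String) = String.ofList ['I','V'] from rfl,
                pvOfListNe _ _ h1, pvOfListNe _ _ h2, pvOfListNe _ _ h3, pvOfListNe _ _ h4]
            have n1 : PySem.Chars.startswith s.toList ['I', ' '] = false := by
              simpa [PySem.Str.startswith] using c1
            have n2 : PySem.Chars.startswith s.toList ['I', 'I', ' '] = false := by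
              simpa [PySem.Str.startswith] using c2
            have n3 : PySem.Chars.startswith s.toList ['I', 'I', 'I', ' '] = false := by
              simpa [PySem.Str.startswith] using c3
            have n4 : PySem.Chars.startswith s.toList ['I', 'V', ' '] = false := by
              simpa [PySem.Str.startswith] using c4
            simp [normalize_book_name, pvGoA, pvRomanPairs, n1, n2, n3, n4,
              normalize_book_name_alt, hs, hnone]
  · -- no space: no roman prefix can match and the split has a single piece
    have hnos : ∀ t : List Char, PySem.Chars.startswith s.toList (t ++ [' ']) = false := by
      intro t
      rw [Bool.eq_false_iff]
      intro hcon
      rw [PySem.Chars.startswith_iff] at hcon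
      obtain ⟨r, hr⟩ := hcon
      apply hsp
      rw [← hr]; simp
    have hs : PySem.Str.splitMax? s " " 1 = some [String.ofList s.toList] := by
      simp only [PySem.Str.splitMax?, PySem.Chars.splitMax?, show (" " : String).toList = [' '] from rfl]
      rw [pvSplit1]
      simp [hsp]
    have n1 : PySem.Chars.startswith s.toList ['I', ' '] = false := hnos ['I']
    have n2 : PySem.Chars.startswith s.toList ['I', 'I', ' '] = false := hnos ['I', 'I']
    have n3 : PySem.Chars.startswith s.toList ['I', 'I', 'I', ' '] = false := hnos ['I', 'I', 'I']
    have n4 : PySem.Chars.startswith s.toList ['I', 'V', ' '] = false := hnos ['I', 'V']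
    simp [normalize_book_name, pvGoA, pvRomanPairs, PySem.Str.startswith,
      n1, n2, n3, n4, normalize_book_name_alt, hs]

-- ===== VERDICT (by name: the statement is the Claim_ definition above) =====
theorem normalize_book_name_spec : Claim_equal_normalize_book_name := by
  intro s _
  unfold Spec_normalize_book_name
  exact pvMain s
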